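-- pv_equiv track=rewrite | github.com/HoangMH1304/2048_Cross_Platform_Game | 2048_Scripts/main.py | check_turn_left
-- ===== SOURCE A (Python) =====
-- matrix_size = 4
--
-- def check_turn_left(board):
--     idx = -1
--     for i in range(matrix_size):
--         for j in range(matrix_size):
--             if board[i][j] <= 1: continue
--             if j == matrix_size - 1:
--                 if board[i][j - 1] == 0 and idx == -1:
--                     idx = i
--                     continue
--             for k in range(j + 1, matrix_size):
--                 if j > 0 and board[i][j - 1] == 0 and idx == -1:
--                     idx = i
--                 if board[i][j] != board[i][k] and board[i][k] != 0:
--                     break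
--                 if board[i][j] == board[i][k]:
--                     return i
--     return idx
-- ===== SOURCE B (Python) =====
-- matrix_size = 4
--
-- def check_turn_left(board):
--     merge_row = -1
--     empty_row = -1
--     for i in range(matrix_size):
--         row = [board[i][j] for j in range(matrix_size)]
--         comp = [v for v in row if v != 0]
--         if merge_row == -1 and any(a == b and a > 1 for a, b in zip(comp, comp[1:])):
--             merge_row = i
--         if empty_row == -1 and any(row[j] > 1 and row[j - 1] == 0 for j in range(1, matrix_size)):
--             empty_row = i
--     return merge_row if merge_row != -1 else empty_row
-- ===== Notes on version B (the rewrite author's own statement) =====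
-- stated objective: simpler
-- what changed: Replaces A's triple-nested scan with early return by a single pass over the 4 rows that records the first row with an adjacent equal pair (>1) in the zero-compressed row and the first row with a >1 tile right of a 0, returning the merge row if any, else the empty-left row.
-- outside the precondition, e.g. on check_turn_left([[2, 2, 0, 0]]): A returns 0, B raises IndexError
import Mathlib
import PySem

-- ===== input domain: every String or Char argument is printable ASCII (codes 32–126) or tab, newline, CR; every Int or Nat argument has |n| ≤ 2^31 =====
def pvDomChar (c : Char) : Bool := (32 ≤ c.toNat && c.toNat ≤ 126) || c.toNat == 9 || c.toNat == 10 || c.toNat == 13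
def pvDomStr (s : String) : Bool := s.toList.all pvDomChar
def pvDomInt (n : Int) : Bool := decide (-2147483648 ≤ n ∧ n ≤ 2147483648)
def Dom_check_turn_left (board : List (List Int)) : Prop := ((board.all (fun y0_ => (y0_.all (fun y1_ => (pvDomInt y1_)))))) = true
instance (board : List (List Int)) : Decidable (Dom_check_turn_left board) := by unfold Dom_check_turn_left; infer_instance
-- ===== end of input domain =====

-- B replaces A's triple-nested scan with early return by one pass over the 4 rows recording the
-- first mergeable row and the first empty-left row (objective: simpler); return value only, no mutation.

def matrix_size : Int := 4

-- ===== PORT A =====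
-- board[i][j]; PySem.List.pyGetD is exact here because Pre_ keeps every index in range
def pvAget (board : List (List Int)) (i j : Int) : Int :=
  PySem.List.pyGetD (PySem.List.pyGetD board i []) j 0

-- inner 'for k in range(j+1, matrix_size)': Sum.inl r = 'return r', Sum.inr idx = fall through
def pvKLoop (board : List (List Int)) (i j idx : Int) : List Int → Int ⊕ Int
  | [] => Sum.inr idx
  | k :: ks =>
    let idx' := if j > 0 ∧ pvAget board i (j - 1) = 0 ∧ idx = -1 then i else idx
    if pvAget board i j ≠ pvAget board i k ∧ pvAget board i k ≠ 0 then Sum.inr idx'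
    else if pvAget board i j = pvAget board i k then Sum.inl i
    else pvKLoop board i j idx' ks

-- middle 'for j in range(matrix_size)'
def pvJLoop (board : List (List Int)) (i idx : Int) : List Int → Int ⊕ Int
  | [] => Sum.inr idx
  | j :: js =>
    if pvAget board i j ≤ 1 then pvJLoop board i idx js
    else if j = matrix_size - 1 ∧ pvAget board i (j - 1) = 0 ∧ idx = -1 then
      pvJLoop board i i js
    else
      match pvKLoop board i j idx (PySem.List.pyRange (j + 1) matrix_size 1) with
      | Sum.inl r => Sum.inl r
      | Sum.inr idx' => pvJLoop board i idx' js

-- outer 'for i in range(matrix_size)'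
def pvILoop (board : List (List Int)) (idx : Int) : List Int → Int
  | [] => idx
  | i :: is =>
    match pvJLoop board i idx (PySem.List.pyRange 0 matrix_size 1) with
    | Sum.inl r => r
    | Sum.inr idx' => pvILoop board idx' is

def check_turn_left (board : List (List Int)) : Int :=
  pvILoop board (-1) (PySem.List.pyRange 0 matrix_size 1)

-- ===== PORT B =====
-- any(a == b and a > 1 for a, b in zip(comp, comp[1:]))
def pvHasMerge (comp : List Int) : Bool :=
  (comp.zip comp.tail).any (fun p => p.1 = p.2 ∧ p.1 > 1)

-- any(row[j] > 1 and row[j-1] == 0 for j in range(1, matrix_size))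
def pvHasEmptyLeft (row : List Int) : Bool :=
  (PySem.List.pyRange 1 matrix_size 1).any
    (fun j => PySem.List.pyGetD row j 0 > 1 ∧ PySem.List.pyGetD row (j - 1) 0 = 0)

def check_turn_left_alt (board : List (List Int)) : Int :=
  let st := (PySem.List.pyRange 0 matrix_size 1).foldl
    (fun (st : Int × Int) i =>
      let row := (PySem.List.pyRange 0 matrix_size 1).map (fun j => pvAget board i j)
      let comp := row.filter (fun v => v ≠ 0)
      (if st.1 = -1 ∧ pvHasMerge comp then i else st.1,
       if st.2 = -1 ∧ pvHasEmptyLeft row then i else st.2))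
    (-1, -1)
  if st.1 ≠ -1 then st.1 else st.2

-- ===== PRECONDITION & SPEC =====
-- Pre_ excludes boards without a full 4×4 prefix: there Python A raises IndexError except when an
-- early merge returns first, and B itself raises IndexError while building the row.
def Pre_check_turn_left (board : List (List Int)) : Prop :=
  4 ≤ board.length ∧ ∀ r ∈ board.take 4, 4 ≤ r.length
instance (board : List (List Int)) : Decidable (Pre_check_turn_left board) := by
  unfold Pre_check_turn_left; infer_instance

def pvWitness_check_turn_left : List (List Int) :=
  [[2, 0, 2, 0], [0, 0, 0, 0], [1, 1, 1, 1], [0, 4, 4, 0]]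

def Spec_check_turn_left (board : List (List Int)) (out : Int) : Prop := out = check_turn_left_alt board
instance (board : List (List Int)) (out : Int) : Decidable (Spec_check_turn_left board out) := by unfold Spec_check_turn_left; infer_instance

-- ===== CLAIM (what is proved, stated in full; the proofs are below) =====
def Claim_equal_check_turn_left : Prop := ∀ (board : List (List Int)), Dom_check_turn_left board → Pre_check_turn_left board → Spec_check_turn_left board (check_turn_left board)

-- ===== LEMMAS AND PROOFS =====

-- the two per-row conditions, as closed propositions on the four row entries
def pvMergeB (x0 x1 x2 x3 : Int) : Bool :=
  decide ((x0 > 1 ∧ (x1 = x0 ∨ (x1 = 0 ∧ (x2 = x0 ∨ (x2 = 0 ∧ x3 = x0))))) ∨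
          (x1 > 1 ∧ (x2 = x1 ∨ (x2 = 0 ∧ x3 = x1))) ∨
          (x2 > 1 ∧ x3 = x2))

def pvEmptyB (x0 x1 x2 x3 : Int) : Bool :=
  decide ((x1 > 1 ∧ x0 = 0) ∨ (x2 > 1 ∧ x1 = 0) ∨ (x3 > 1 ∧ x2 = 0))

theorem hasEmpty_eq (x0 x1 x2 x3 : Int) :
    pvHasEmptyLeft [x0, x1, x2, x3] = pvEmptyB x0 x1 x2 x3 := by
  simp only [pvHasEmptyLeft, pvEmptyB, show PySem.List.pyRange 1 matrix_size 1 = [1,2,3] from rfl,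
    List.any_cons, List.any_nil]
  norm_num [PySem.List.pyGetD]
  rw [Bool.eq_iff_iff]
  simp only [Bool.or_eq_true, Bool.and_eq_true, decide_eq_true_eq,
    show (2:Int).toNat = 2 from rfl, show (3:Int).toNat = 3 from rfl,
    List.getElem_cons_succ, List.getElem_cons_zero]

theorem hasMerge_eq (x0 x1 x2 x3 : Int) :
    pvHasMerge ([x0, x1, x2, x3].filter (fun v => v ≠ 0)) = pvMergeB x0 x1 x2 x3 := by
  by_cases h0 : x0 = 0 <;> by_cases h1 : x1 = 0 <;> by_cases h2 : x2 = 0 <;> by_cases h3 : x3 = 0 <;>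
    simp [pvHasMerge, pvMergeB, h0, h1, h2, h3, List.filter] <;>
    first
    | omega
    | (rw [Bool.eq_iff_iff]; simp only [Bool.or_eq_true, Bool.and_eq_true, decide_eq_true_eq]; omega)

theorem kLoop3 (b : List (List Int)) (i : Int) : ∀ idx : Int,
    pvKLoop b i 3 idx (PySem.List.pyRange (3 + 1) matrix_size 1) = Sum.inr idx :=
  fun _ => rfl

theorem kLoop2 (b : List (List Int)) (i x1 x2 x3 : Int)
    (h1 : pvAget b i 1 = x1) (h2 : pvAget b i 2 = x2) (h3 : pvAget b i 3 = x3) :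
    ∀ idx : Int, pvKLoop b i 2 idx (PySem.List.pyRange (2 + 1) matrix_size 1) =
      (if x3 = x2 then Sum.inl i
       else Sum.inr (if x1 = 0 ∧ idx = -1 then i else idx)) := by
  intro idx
  simp only [show PySem.List.pyRange (2 + 1) matrix_size 1 = [(3:Int)] from rfl]
  simp only [pvKLoop]
  norm_num
  simp only [h1, h2, h3]
  split_ifs <;> first | rfl | omega | (exfalso; omega) | (simp only [Sum.inr.injEq]; omega)

theorem kLoop1 (b : List (List Int)) (i x0 x1 x2 x3 : Int)
    (h0 : pvAget b i 0 = x0) (h1 : pvAget b i 1 = x1) (h2 : pvAget b i 2 = x2)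
    (h3 : pvAget b i 3 = x3) :
    ∀ idx : Int, pvKLoop b i 1 idx (PySem.List.pyRange (1 + 1) matrix_size 1) =
      (if x2 = x1 ∨ (x2 = 0 ∧ x3 = x1) then Sum.inl i
       else Sum.inr (if x0 = 0 ∧ idx = -1 then i else idx)) := by
  intro idx
  simp only [show PySem.List.pyRange (1 + 1) matrix_size 1 = [(2:Int), 3] from rfl]
  simp only [pvKLoop]
  norm_num
  simp only [h0, h1, h2, h3]
  split_ifs <;> first | rfl | omega | (exfalso; omega) | (simp only [Sum.inr.injEq]; omega)

theorem kLoop0 (b : List (List Int)) (i x0 x1 x2 x3 : Int)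
    (h0 : pvAget b i 0 = x0) (h1 : pvAget b i 1 = x1) (h2 : pvAget b i 2 = x2)
    (h3 : pvAget b i 3 = x3) :
    ∀ idx : Int, pvKLoop b i 0 idx (PySem.List.pyRange (0 + 1) matrix_size 1) =
      (if x1 = x0 ∨ (x1 = 0 ∧ (x2 = x0 ∨ (x2 = 0 ∧ x3 = x0))) then Sum.inl i
       else Sum.inr idx) := by
  intro idx
  simp only [show PySem.List.pyRange (0 + 1) matrix_size 1 = [(1:Int), 2, 3] from rfl]
  simp only [pvKLoop]
  norm_num
  simp only [h0, h1, h2, h3]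
  split_ifs <;> first | rfl | omega | (exfalso; omega) | (simp only [Sum.inr.injEq]; omega)

theorem jLoop3 (b : List (List Int)) (i x2 x3 : Int)
    (h2 : pvAget b i 2 = x2) (h3 : pvAget b i 3 = x3) :
    ∀ idx : Int, pvJLoop b i idx [3] =
      Sum.inr (if idx = -1 ∧ x3 > 1 ∧ x2 = 0 then i else idx) := by
  intro idx
  simp only [pvJLoop, kLoop3]
  norm_num [matrix_size]
  simp only [h2, h3]
  split_ifs <;> first | rfl | omega | (exfalso; omega) | (simp only [Sum.inr.injEq]; omega)

theorem jLoop2 (b : List (List Int)) (i x1 x2 x3 : Int)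
    (h1 : pvAget b i 1 = x1) (h2 : pvAget b i 2 = x2) (h3 : pvAget b i 3 = x3) :
    ∀ idx : Int, pvJLoop b i idx [2, 3] =
      (if x2 > 1 ∧ x3 = x2 then Sum.inl i
       else Sum.inr (if idx = -1 ∧ ((x2 > 1 ∧ x1 = 0) ∨ (x3 > 1 ∧ x2 = 0)) then i else idx)) := by
  intro idx
  simp only [pvJLoop, kLoop2 b i x1 x2 x3 h1 h2 h3, jLoop3 b i x2 x3 h2 h3, kLoop3]
  norm_num [matrix_size]
  simp only [h1, h2, h3]
  split_ifs <;> (try simp only [jLoop3 b i x2 x3 h2 h3]) <;> (try split_ifs) <;>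
    first | rfl | omega | (exfalso; omega) | (simp only [Sum.inr.injEq]; omega)

theorem jLoop1 (b : List (List Int)) (i x0 x1 x2 x3 : Int)
    (h0 : pvAget b i 0 = x0) (h1 : pvAget b i 1 = x1) (h2 : pvAget b i 2 = x2)
    (h3 : pvAget b i 3 = x3) :
    ∀ idx : Int, pvJLoop b i idx [1, 2, 3] =
      (if (x1 > 1 ∧ (x2 = x1 ∨ (x2 = 0 ∧ x3 = x1))) ∨ (x2 > 1 ∧ x3 = x2) then Sum.inl i
       else Sum.inr (if idx = -1 ∧ ((x1 > 1 ∧ x0 = 0) ∨ (x2 > 1 ∧ x1 = 0) ∨ (x3 > 1 ∧ x2 = 0))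
                     then i else idx)) := by
  intro idx
  rw [show ([1, 2, 3] : List Int) = 1 :: [2, 3] from rfl, pvJLoop]
  rw [kLoop1 b i x0 x1 x2 x3 h0 h1 h2 h3]
  norm_num [matrix_size]
  simp only [h0, h1, h2, h3, jLoop2 b i x1 x2 x3 h1 h2 h3]
  split_ifs <;> (try dsimp only) <;> (try simp only [jLoop2 b i x1 x2 x3 h1 h2 h3]) <;>
    (try split_ifs) <;>
    first | rfl | omega | (exfalso; omega) | (simp only [Sum.inr.injEq]; omega)

theorem jLoop_eq2 (b : List (List Int)) (i : Int) (x0 x1 x2 x3 : Int)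
    (h0 : pvAget b i 0 = x0) (h1 : pvAget b i 1 = x1) (h2 : pvAget b i 2 = x2)
    (h3 : pvAget b i 3 = x3) :
    ∀ idx : Int, pvJLoop b i idx (PySem.List.pyRange 0 matrix_size 1) =
      (if pvMergeB x0 x1 x2 x3 then Sum.inl i
       else Sum.inr (if idx = -1 ∧ pvEmptyB x0 x1 x2 x3 = true then i else idx)) := by
  intro idx
  rw [show PySem.List.pyRange 0 matrix_size 1 = (0 : Int) :: [1, 2, 3] from rfl, pvJLoop]
  rw [kLoop0 b i x0 x1 x2 x3 h0 h1 h2 h3]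
  norm_num [matrix_size]
  simp only [h0, h1, h2, h3, jLoop1 b i x0 x1 x2 x3 h0 h1 h2 h3, pvMergeB, pvEmptyB,
    decide_eq_true_eq]
  split_ifs <;> (try dsimp only) <;> (try simp only [jLoop1 b i x0 x1 x2 x3 h0 h1 h2 h3]) <;>
    (try split_ifs) <;>
    first | rfl | omega | (exfalso; omega) | (simp only [Sum.inr.injEq]; omega)

theorem jLoop_eq3 (b : List (List Int)) (i : Int) (x0 x1 x2 x3 : Int)
    (h0 : pvAget b i 0 = x0) (h1 : pvAget b i 1 = x1) (h2 : pvAget b i 2 = x2)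
    (h3 : pvAget b i 3 = x3) :
    ∀ idx : Int, pvJLoop b i idx [0, 1, 2, 3] =
      (if pvMergeB x0 x1 x2 x3 then Sum.inl i
       else Sum.inr (if idx = -1 ∧ pvEmptyB x0 x1 x2 x3 = true then i else idx)) := by
  have h := jLoop_eq2 b i x0 x1 x2 x3 h0 h1 h2 h3
  rwa [show PySem.List.pyRange 0 matrix_size 1 = [(0:Int), 1, 2, 3] from rfl] at h

-- ===== VERDICT (by name: the statement is the Claim_ definition above) =====
theorem check_turn_left_spec : Claim_equal_check_turn_left := by
  intro board _ _
  unfold Spec_check_turn_left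
  simp only [check_turn_left, check_turn_left_alt,
    show PySem.List.pyRange 0 matrix_size 1 = [(0:Int), 1, 2, 3] from rfl,
    List.map, List.foldl, pvILoop,
    jLoop_eq3 board 0 _ _ _ _ rfl rfl rfl rfl,
    jLoop_eq3 board 1 _ _ _ _ rfl rfl rfl rfl,
    jLoop_eq3 board 2 _ _ _ _ rfl rfl rfl rfl,
    jLoop_eq3 board 3 _ _ _ _ rfl rfl rfl rfl,
    hasMerge_eq, hasEmpty_eq]
  generalize pvMergeB (pvAget board 0 0) (pvAget board 0 1) (pvAget board 0 2) (pvAget board 0 3) = m0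
  generalize pvMergeB (pvAget board 1 0) (pvAget board 1 1) (pvAget board 1 2) (pvAget board 1 3) = m1
  generalize pvMergeB (pvAget board 2 0) (pvAget board 2 1) (pvAget board 2 2) (pvAget board 2 3) = m2
  generalize pvMergeB (pvAget board 3 0) (pvAget board 3 1) (pvAget board 3 2) (pvAget board 3 3) = m3
  generalize pvEmptyB (pvAget board 0 0) (pvAget board 0 1) (pvAget board 0 2) (pvAget board 0 3) = e0
  generalize pvEmptyB (pvAget board 1 0) (pvAget board 1 1) (pvAget board 1 2) (pvAget board 1 3) = e1
  generalize pvEmptyB (pvAget board 2 0) (pvAget board 2 1) (pvAget board 2 2) (pvAget board 2 3) = e2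
  generalize pvEmptyB (pvAget board 3 0) (pvAget board 3 1) (pvAget board 3 2) (pvAget board 3 3) = e3
  revert m0 m1 m2 m3 e0 e1 e2 e3
  decide
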